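-- pv_equiv track=rewrite | github.com/korsoun/python_homework3_july | 5.py | get_full_Fibonacci
-- ===== SOURCE A (Python) =====
-- def get_full_Fibonacci (k):
--     fib_pos_list = []  # хранит список с положительным рядом
--     fib_neg_list_inv = [] # хранит список с отрицательным рядом в обратном порядке
--     for i in range(k):  # правила для заполнения списков
--         if i == 0:
--             fib_pos_list.append(1)
--             fib_neg_list_inv.append(1)
--         if i == 1:
--             fib_pos_list.append(1)
--             fib_neg_list_inv.append(-1)
--         if i > 1:
--             fib_pos_list.append(fib_pos_list[len(fib_pos_list)-2] + fib_pos_list[len(fib_pos_list)-1])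
--             fib_neg_list_inv.append(fib_neg_list_inv[len(fib_neg_list_inv)-2] - fib_neg_list_inv[len(fib_neg_list_inv)-1])
--     fib_full_list = []  # хранит весь список
--     i = k-1
--     while i >= 0:
--         fib_full_list.append(fib_neg_list_inv[i])  # заполнение отрицательным рядом
--         i -= 1
--     fib_full_list.append(0)  # добавление нуля
--     for i in range(k):
--         fib_full_list.append(fib_pos_list[i])   # заполнение положительным рядом
--     return fib_full_list
-- ===== SOURCE B (Python) =====
-- def get_full_Fibonacci(k):
--     # single recurrence with pair state; the negative half comes from the
--     # alternating-sign identity for negative-index Fibonacci numbers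
--     pos = []
--     a, b = 1, 1
--     for _ in range(k):
--         pos.append(a)
--         a, b = b, a + b
--     neg_inv = [x if j % 2 == 0 else -x for j, x in enumerate(pos)]
--     return neg_inv[::-1] + [0] + pos
-- ===== Notes on version B (the rewrite author's own statement) =====
-- stated objective: simpler
-- what changed: B keeps only an (a, b) pair for one standard Fibonacci recurrence and derives the whole negative half from the closed-form alternating-sign identity for negative-index Fibonacci numbers plus a list reversal, instead of A's second subtraction recurrence, index-based last-two lookups and an explicit while countdown loop.
import Mathlib
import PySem

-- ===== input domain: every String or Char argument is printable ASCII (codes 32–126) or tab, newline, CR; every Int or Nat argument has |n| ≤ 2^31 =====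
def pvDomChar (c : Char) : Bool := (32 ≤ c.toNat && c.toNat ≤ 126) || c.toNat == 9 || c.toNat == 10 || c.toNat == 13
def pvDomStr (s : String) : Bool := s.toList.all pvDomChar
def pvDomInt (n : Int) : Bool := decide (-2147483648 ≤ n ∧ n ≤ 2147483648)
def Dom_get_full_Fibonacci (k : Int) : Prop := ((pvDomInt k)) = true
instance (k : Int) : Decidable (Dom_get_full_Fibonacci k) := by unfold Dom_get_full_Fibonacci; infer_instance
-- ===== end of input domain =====

-- B replaces A's second subtraction recurrence and index-countdown while loop by one
-- (a, b) Fibonacci recurrence plus a closed-form sign rule and a reversal (objective: simpler).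

-- ===== PORT A =====
-- loop body of A's `for i in range(k)` (three sequential ifs, two lists as the state);
-- `xs[len(xs)-2]` / `xs[len(xs)-1]` are always in range when read, so the .getD default 0
-- of pyGetD is never used.
def pvStepA (st : List Int × List Int) (i : Int) : List Int × List Int :=
  let st := if i = 0 then (st.1 ++ [1], st.2 ++ [1]) else st
  let st := if i = 1 then (st.1 ++ [1], st.2 ++ [-1]) else st
  if 1 < i then
    (st.1 ++ [PySem.List.pyGetD st.1 ((st.1.length : Int) - 2) 0 +
              PySem.List.pyGetD st.1 ((st.1.length : Int) - 1) 0],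
     st.2 ++ [PySem.List.pyGetD st.2 ((st.2.length : Int) - 2) 0 -
              PySem.List.pyGetD st.2 ((st.2.length : Int) - 1) 0])
  else st

-- A's `i = k-1; while i >= 0: full.append(neg[i]); i -= 1`
def pvAWhile (neg : List Int) (i : Int) (acc : List Int) : List Int :=
  if _h : 0 ≤ i then pvAWhile neg (i - 1) (acc ++ [PySem.List.pyGetD neg i 0]) else acc
termination_by (i + 1).toNat
decreasing_by simp_wf; omega

def get_full_Fibonacci (k : Int) : List Int :=
  let st := (PySem.List.pyRange 0 k 1).foldl pvStepA ([], [])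
  let full := pvAWhile st.2 (k - 1) []
  let full := full ++ [0]
  (PySem.List.pyRange 0 k 1).foldl (fun acc i => acc ++ [PySem.List.pyGetD st.1 i 0]) full

-- ===== PORT B =====
-- `for _ in range(k): pos.append(a); a, b = b, a + b`
def pvBPos : Nat → Int → Int → List Int
  | 0, _, _ => []
  | n + 1, a, b => a :: pvBPos n b (a + b)

def get_full_Fibonacci_alt (k : Int) : List Int :=
  let pos := pvBPos k.toNat 1 1
  let negInv := (PySem.List.enumerate pos 0).map (fun jx => if jx.1 % 2 = 0 then jx.2 else -jx.2)
  negInv.reverse ++ [0] ++ pos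

-- ===== PRECONDITION & SPEC =====
def Spec_get_full_Fibonacci (k : Int) (out : List Int) : Prop := out = get_full_Fibonacci_alt k
instance (k : Int) (out : List Int) : Decidable (Spec_get_full_Fibonacci k out) := by unfold Spec_get_full_Fibonacci; infer_instance

-- ===== CLAIM (what is proved, stated in full; the proofs are below) =====
def Claim_equal_get_full_Fibonacci : Prop := ∀ (k : Int), Dom_get_full_Fibonacci k → Spec_get_full_Fibonacci k (get_full_Fibonacci k)

-- ===== LEMMAS AND PROOFS =====

-- positive Fibonacci numbers F 0 = F 1 = 1
def pvF : Nat → Int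
  | 0 => 1
  | 1 => 1
  | n + 2 => pvF n + pvF (n + 1)

def pvPosRef (n : Nat) : List Int := (List.range n).map pvF

def pvSign (j : Nat) : Int := if (j : Int) % 2 = 0 then pvF j else -pvF j

def pvNegRef (n : Nat) : List Int := (List.range n).map pvSign

theorem pvStepA_ref (n : Nat) :
    pvStepA (pvPosRef n, pvNegRef n) (n : Int) = (pvPosRef (n + 1), pvNegRef (n + 1)) := by
  match n with
  | 0 => decide
  | 1 => decide
  | m + 2 =>
    have h2 : ¬ ((m + 2 : Nat) : Int) = 0 := by omega
    have h1 : ¬ ((m + 2 : Nat) : Int) = 1 := by omega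
    have hg : (1 : Int) < ((m + 2 : Nat) : Int) := by omega
    simp only [pvStepA, h2, h1, hg, if_pos, if_neg, not_false_iff]
    have hlp : ((pvPosRef (m + 2)).length : Int) = (m + 2 : Nat) := by simp [pvPosRef]
    have hln : ((pvNegRef (m + 2)).length : Int) = (m + 2 : Nat) := by simp [pvNegRef]
    rw [hlp, hln]
    have e2 : (((m + 2 : Nat) : Int) - 2) = ((m : Nat) : Int) := by omega
    have e1 : (((m + 2 : Nat) : Int) - 1) = ((m + 1 : Nat) : Int) := by omega
    rw [e2, e1]
    have gp : ∀ (j n : Nat), j < n → PySem.List.pyGetD (pvPosRef n) (j : Int) 0 = pvF j := by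
      intro j n hj
      rw [PySem.List.pyGetD_ofNat (pvPosRef n) j 0 (by simp [pvPosRef]; omega)]
      simp [pvPosRef]
    have gn : ∀ (j n : Nat), j < n → PySem.List.pyGetD (pvNegRef n) (j : Int) 0 = pvSign j := by
      intro j n hj
      rw [PySem.List.pyGetD_ofNat (pvNegRef n) j 0 (by simp [pvNegRef]; omega)]
      simp [pvNegRef]
    rw [gp m (m + 2) (by omega), gp (m + 1) (m + 2) (by omega),
        gn m (m + 2) (by omega), gn (m + 1) (m + 2) (by omega)]
    simp only [Prod.mk.injEq]
    constructor
    · simp [pvPosRef, List.range_succ]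
      exact (pvF.eq_3 m).symm
    · simp only [pvNegRef, List.range_succ, List.map_append, List.map_cons, List.map_nil,
        List.append_cancel_left_eq]
      have : pvSign m - pvSign (m + 1) = pvSign (m + 2) := by
        unfold pvSign
        rcases Int.emod_two_eq_zero_or_one (m : Int) with h | h
        · rw [if_pos h, if_neg (show ¬ (((m + 1 : Nat) : Int) % 2 = 0) by push_cast; omega),
              if_pos (show (((m + 2 : Nat) : Int) % 2 = 0) by push_cast; omega), pvF.eq_3 m]
          ring
        · rw [if_neg (show ¬ ((m : Int) % 2 = 0) by omega),
              if_pos (show (((m + 1 : Nat) : Int) % 2 = 0) by push_cast; omega),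
              if_neg (show ¬ (((m + 2 : Nat) : Int) % 2 = 0) by push_cast; omega), pvF.eq_3 m]
          ring
      simp [this]

theorem pvFoldA (n : Nat) :
    (List.range n).foldl (fun st (j : Nat) => pvStepA st (j : Int)) (([], []) : List Int × List Int)
      = (pvPosRef n, pvNegRef n) := by
  induction n with
  | zero => rfl
  | succ m ih =>
      rw [List.range_succ, List.foldl_append, ih]
      simpa using pvStepA_ref m

theorem pvAWhile_take (xs : List Int) (j : Nat) (hj : j ≤ xs.length) :
    ∀ acc, pvAWhile xs ((j : Int) - 1) acc = acc ++ (xs.take j).reverse := by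
  induction j with
  | zero =>
      intro acc
      rw [pvAWhile]
      simp
  | succ m ih =>
      intro acc
      have h0 : (0 : Int) ≤ ((m + 1 : Nat) : Int) - 1 := by omega
      rw [pvAWhile, dif_pos h0]
      have e : ((m + 1 : Nat) : Int) - 1 = (m : Nat) := by omega
      rw [e]
      have hm : m < xs.length := by omega
      have hget : PySem.List.pyGetD xs ((m : Nat) : Int) 0 = xs[m] :=
        PySem.List.pyGetD_ofNat xs m 0 hm
      rw [ih (by omega) (acc ++ [PySem.List.pyGetD xs ((m : Nat) : Int) 0])]
      rw [hget]
      have ht : List.take (m + 1) xs = List.take m xs ++ [xs[m]] := by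
        rw [List.take_add_one]
        simp [List.getElem?_eq_getElem hm]
      rw [ht, List.reverse_append]
      simp [List.append_assoc]

theorem pvBPos_ref (n : Nat) : ∀ m, pvBPos n (pvF m) (pvF (m + 1)) = (List.range n).map (fun j => pvF (m + j)) := by
  induction n with
  | zero => intro m; rfl
  | succ p ih =>
      intro m
      rw [pvBPos]
      rw [show pvF m + pvF (m + 1) = pvF (m + 2) from (pvF.eq_3 m).symm]
      rw [ih (m + 1)]
      rw [List.range_succ_eq_map]
      simp only [List.map_cons, List.map_map, Nat.add_zero]
      refine congrArg₂ List.cons rfl ?_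
      apply List.map_congr_left
      intro j _
      simp only [Function.comp_apply]
      congr 1
      omega

theorem pvNegInv_ref (n : Nat) :
    (PySem.List.enumerate (pvPosRef n) 0).map (fun jx => if jx.1 % 2 = 0 then jx.2 else -jx.2)
      = pvNegRef n := by
  apply List.ext_getElem
  · simp [pvNegRef, pvPosRef, PySem.List.length_enumerate]
  · intro i h1 h2
    simp only [List.getElem_map, PySem.List.getElem_enumerate, pvNegRef, List.getElem_range]
    have hi : i < n := by simpa [pvNegRef] using h2
    have : (pvPosRef n)[i]'(by simpa [pvPosRef] using hi) = pvF i := by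
      simp [pvPosRef]
    simp [this, pvSign]

theorem get_full_Fibonacci_eq (k : Int) : get_full_Fibonacci k = get_full_Fibonacci_alt k := by
  by_cases hk : k ≤ 0
  · have hr : PySem.List.pyRange 0 k 1 = [] := PySem.List.pyRange_one_eq_nil hk
    have ht : k.toNat = 0 := by omega
    rw [get_full_Fibonacci, get_full_Fibonacci_alt, hr, ht]
    rw [pvAWhile]
    simp [pvBPos]
    omega
  · rw [not_le] at hk
    set n := k.toNat with hn
    have hkn : k = (n : Int) := by omega
    rw [get_full_Fibonacci, get_full_Fibonacci_alt, hkn]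
    simp only [Int.toNat_natCast]
    have hr : PySem.List.pyRange 0 (n : Int) 1 = (List.range n).map (fun j : Nat => (j : Int)) := by
      rw [PySem.List.pyRange_one]
      rw [show ((n : Int) - 0).toNat = n by omega]
      apply List.map_congr_left
      intro a _
      omega
    rw [hr]
    simp only [List.foldl_map]
    rw [pvFoldA n]
    have hwhile : pvAWhile (pvPosRef n, pvNegRef n).2 ((n : Int) - 1) [] = (pvNegRef n).reverse := by
      have h1 := pvAWhile_take (pvNegRef n) n (by simp [pvNegRef]) []
      have h2 : List.take n (pvNegRef n) = pvNegRef n := by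
        apply List.take_of_length_le
        simp [pvNegRef]
      rw [h2] at h1
      simpa using h1
    rw [hwhile]
    have hpos : pvBPos n 1 1 = pvPosRef n := by
      have := pvBPos_ref n 0
      simpa [pvPosRef, pvF] using this
    rw [hpos, pvNegInv_ref n]
    have hfold : ∀ (init : List Int),
        (List.range n).foldl
          (fun acc (j : Nat) => acc ++ [PySem.List.pyGetD (pvPosRef n, pvNegRef n).1 (j : Int) 0]) init
          = init ++ pvPosRef n := by
      intro init
      have : ∀ (m : Nat), m ≤ n → ∀ init,
          (List.range m).foldl (fun acc (j : Nat) => acc ++ [PySem.List.pyGetD (pvPosRef n) (j : Int) 0]) init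
            = init ++ (pvPosRef n).take m := by
        intro m
        induction m with
        | zero => intro _ init; simp
        | succ p ih =>
            intro hp init
            rw [List.range_succ, List.foldl_append, ih (by omega)]
            have hp' : p < (pvPosRef n).length := by simp [pvPosRef]; omega
            have hget : PySem.List.pyGetD (pvPosRef n) ((p : Nat) : Int) 0 = (pvPosRef n)[p]'hp' :=
              PySem.List.pyGetD_ofNat (pvPosRef n) p 0 hp'
            simp only [List.foldl_cons, List.foldl_nil, hget, List.take_add_one]
            simp [List.getElem?_eq_getElem hp', List.append_assoc]
      have h := this n (le_refl n) init
      have h2 : List.take n (pvPosRef n) = pvPosRef n := by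
        apply List.take_of_length_le
        simp [pvPosRef]
      rw [h2] at h
      exact h
    rw [hfold]

-- ===== VERDICT (by name: the statement is the Claim_ definition above) =====
theorem get_full_Fibonacci_spec : Claim_equal_get_full_Fibonacci := by
  intro k _
  unfold Spec_get_full_Fibonacci
  exact get_full_Fibonacci_eq k
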